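-- pv_equiv track=rewrite | github.com/dyllanwli/Geocoding | models/bi-lstm-crf/src/data/data_utils.py | convert_iobes
-- ===== SOURCE A (Python) =====
-- def convert_iobes(tags):
--     """
--     Function to convert IOB tagging schema to IOBES.
--     """
--     new_tags = []
--     for i, tag in enumerate(tags):
--         if tag == 'O':
--             new_tags.append(tag)
--         elif tag.split('-')[0] == 'B':
--             if i + 1 != len(tags) and \
--                tags[i + 1].split('-')[0] == 'I':
--                 new_tags.append(tag)
--             else:
--                 new_tags.append(tag.replace('B-', 'S-'))
--         elif tag.split('-')[0] == 'I':
--             if i + 1 < len(tags) and \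
--                     tags[i + 1].split('-')[0] == 'I':
--                 new_tags.append(tag)
--             else:
--                 new_tags.append(tag.replace('I-', 'E-'))
--         else:
--             raise Exception('Invalid IOB format!')
--     return new_tags
-- ===== SOURCE B (Python) =====
-- def convert_iobes(tags):
--     """
--     Function to convert IOB tagging schema to IOBES.
--
--     Look-behind pass: keep one pending B-/I- tag and finalize it when the
--     next tag's prefix is known (or at the end).
--     """
--     out = []
--     prev = None  # pending 'B'/'I' tag not yet emitted
--
--     def finalize(next_is_i):
--         nonlocal prev
--         if prev is not None:
--             if next_is_i:
--                 out.append(prev)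
--             elif prev.split('-')[0] == 'B':
--                 out.append(prev.replace('B-', 'S-'))
--             else:
--                 out.append(prev.replace('I-', 'E-'))
--             prev = None
--
--     for tag in tags:
--         if tag == 'O':
--             finalize(False)
--             out.append(tag)
--         else:
--             p = tag.split('-')[0]
--             if p == 'B' or p == 'I':
--                 finalize(p == 'I')
--                 prev = tag
--             else:
--                 raise Exception('Invalid IOB format!')
--     finalize(False)
--     return out
-- ===== Notes on version B (the rewrite author's own statement) =====
-- stated objective: alternative
-- what changed: Replaced the indexed look-ahead (tags[i+1] peeked via enumerate) with a single look-behind pass that buffers one pending B-/I- tag and finalizes it once the next tag's prefix is seen, so the loop state and body differ while the output is identical.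
import Mathlib
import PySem

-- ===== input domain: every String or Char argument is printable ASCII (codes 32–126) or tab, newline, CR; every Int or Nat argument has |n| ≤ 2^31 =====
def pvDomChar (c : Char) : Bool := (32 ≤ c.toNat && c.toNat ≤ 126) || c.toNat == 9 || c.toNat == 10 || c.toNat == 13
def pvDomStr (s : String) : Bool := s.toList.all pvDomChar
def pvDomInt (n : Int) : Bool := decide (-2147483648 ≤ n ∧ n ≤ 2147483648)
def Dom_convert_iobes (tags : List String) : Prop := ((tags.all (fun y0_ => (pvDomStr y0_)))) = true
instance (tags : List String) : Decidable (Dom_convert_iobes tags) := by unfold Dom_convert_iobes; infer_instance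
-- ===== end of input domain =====

-- B replaces A's indexed look-ahead (tags[i+1]) by a look-behind pass buffering one
-- pending B-/I- tag; same output, different loop state (objective: alternative).
-- Both Pythons raise Exception('Invalid IOB format!') on malformed tags; those inputs
-- are excluded by Pre_ (the ports model the raise as Option.none and return [] there).

-- ===== PORT A =====
-- tag.split('-')[0]
def iobesPfx (t : String) : String := ((PySem.Str.split? t "-").getD []).headD ""

-- loop body of A; Option.none models the raise
def stepA (full : List String) (st : Option (List String)) (p : Int × String) : Option (List String) :=
  st.bind fun new_tags =>
    let i := p.1
    let tag := p.2
    if tag = "O" then some (new_tags ++ [tag])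
    else if iobesPfx tag = "B" then
      if i + 1 ≠ (full.length : Int) ∧ iobesPfx (PySem.List.pyGetD full (i + 1) "") = "I" then
        some (new_tags ++ [tag])
      else
        some (new_tags ++ [PySem.Str.replace tag "B-" "S-"])
    else if iobesPfx tag = "I" then
      if i + 1 < (full.length : Int) ∧ iobesPfx (PySem.List.pyGetD full (i + 1) "") = "I" then
        some (new_tags ++ [tag])
      else
        some (new_tags ++ [PySem.Str.replace tag "I-" "E-"])
    else none

def convert_iobes (tags : List String) : List String :=
  match (PySem.List.enumerate tags 0).foldl (stepA tags) (some []) with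
  | none => []          -- unreachable under Pre_: Python raises here
  | some l => l

-- ===== PORT B =====
-- finalize the pending tag (if any) given whether the next tag's prefix is 'I'
def finB (out : List String) (prev : Option String) (nextIsI : Bool) : List String :=
  match prev with
  | none => out
  | some pv =>
    if nextIsI then out ++ [pv]
    else if iobesPfx pv = "B" then out ++ [PySem.Str.replace pv "B-" "S-"]
    else out ++ [PySem.Str.replace pv "I-" "E-"]

-- loop body of B over state (out, pending); Option.none models the raise
def stepB (st : Option (List String × Option String)) (tag : String) :
    Option (List String × Option String) :=
  st.bind fun op =>
    if tag = "O" then some (finB op.1 op.2 false ++ [tag], none)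
    else
      let p := iobesPfx tag
      if p = "B" ∨ p = "I" then some (finB op.1 op.2 (p = "I"), some tag)
      else none

def convert_iobes_alt (tags : List String) : List String :=
  match tags.foldl stepB (some ([], none)) with
  | none => []          -- unreachable under Pre_: Python raises here
  | some (out, prev) => finB out prev false

-- ===== PRECONDITION & SPEC =====
-- Pre_ excludes exactly the inputs containing a malformed tag, on which A raises
-- Exception('Invalid IOB format!') (and B raises the same).
def Pre_convert_iobes (tags : List String) : Prop :=
  ∀ t ∈ tags, t = "O" ∨ iobesPfx t = "B" ∨ iobesPfx t = "I"
instance (tags : List String) : Decidable (Pre_convert_iobes tags) := by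
  unfold Pre_convert_iobes; infer_instance
def pvWitness_convert_iobes : List String := ["B-LOC", "I-LOC", "O", "B-PER"]

def Spec_convert_iobes (tags : List String) (out : List String) : Prop := out = convert_iobes_alt tags
instance (tags : List String) (out : List String) : Decidable (Spec_convert_iobes tags out) := by
  unfold Spec_convert_iobes; infer_instance

-- ===== CLAIM (what is proved, stated in full; the proofs are below) =====
def Claim_equal_convert_iobes : Prop := ∀ (tags : List String), Dom_convert_iobes tags → Pre_convert_iobes tags → Spec_convert_iobes tags (convert_iobes tags)

-- ===== LEMMAS AND PROOFS =====

-- common specification recursion: convert one tag given whether the next prefix is 'I'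
def conv1 (t : String) (keep : Bool) : Option String :=
  if t = "O" then some t
  else if iobesPfx t = "B" then some (if keep then t else PySem.Str.replace t "B-" "S-")
  else if iobesPfx t = "I" then some (if keep then t else PySem.Str.replace t "I-" "E-")
  else none

def nextKeep : List String → Bool
  | [] => false
  | n :: _ => decide (iobesPfx n = "I")

def iobesSpec : List String → Option (List String)
  | [] => some []
  | t :: rest => (conv1 t (nextKeep rest)).bind fun h => (iobesSpec rest).map (h :: ·)

theorem foldlA_none (full : List String) (l : List (Int × String)) :
    l.foldl (stepA full) none = none := by
  induction l with
  | nil => rfl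
  | cons p r ih => simpa [stepA] using ih

theorem foldlA_spec (xs : List String) : ∀ (full : List String) (s : Nat) (acc : List String),
    full.drop s = xs →
    (PySem.List.enumerate xs (s : Int)).foldl (stepA full) (some acc)
      = (iobesSpec xs).map (acc ++ ·) := by
  induction xs with
  | nil => intro full s acc _; simp [PySem.List.enumerate_nil, iobesSpec]
  | cons t r ih =>
    intro full s acc hdrop
    have hs : s < full.length := by
      by_contra h
      simp [List.drop_eq_nil_of_le (Nat.le_of_not_lt h)] at hdrop
    have hdrop' : full.drop (s + 1) = r := by
      have := congrArg (List.drop 1) hdrop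
      simpa [List.drop_drop, Nat.add_comm] using this
    have hlen : full.length = s + 1 + r.length := by
      have h1 := congrArg List.length hdrop'
      rw [List.length_drop] at h1
      omega
    have hcast : ((s : Int) + 1) = (((s + 1 : Nat)) : Int) := by push_cast; ring
    have hcond :
        ((s : Int) + 1 ≠ (full.length : Int) ∧
          iobesPfx (PySem.List.pyGetD full ((s : Int) + 1) "") = "I")
        ↔ nextKeep r = true := by
      rcases hr : r with _ | ⟨n, r'⟩
      · constructor
        · rintro ⟨hne, -⟩
          exfalso; apply hne
          subst hr; simp at hlen; omega
        · intro h; simp [nextKeep] at h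
      · have hgetn : PySem.List.pyGetD full ((s : Int) + 1) "" = n := by
          rw [hcast, PySem.List.pyGetD_natCast]
          have : full[s+1]? = some n := by
            have := congrArg (fun l => l.head?) hdrop'
            simpa [hr, List.head?_drop] using this
          simp [List.getD, this]
        have hne : (s : Int) + 1 ≠ (full.length : Int) := by
          subst hr; simp at hlen; omega
        simp [hgetn, hne, nextKeep]
    have hlt_iff :
        ((s : Int) + 1 < (full.length : Int)) ↔ ((s : Int) + 1 ≠ (full.length : Int)) := by
      constructor
      · intro h; omega
      · intro h
        have : (s : Int) + 1 ≤ (full.length : Int) := by omega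
        omega
    have hspec : iobesSpec (t :: r)
        = (conv1 t (nextKeep r)).bind fun h => (iobesSpec r).map (h :: ·) := rfl
    rw [PySem.List.enumerate_cons, List.foldl_cons]
    by_cases hO : t = "O"
    · have hstep : stepA full (some acc) ((s : Int), t) = some (acc ++ [t]) := by
        simp [stepA, hO]
      rw [hstep, hcast, ih full (s + 1) (acc ++ [t]) hdrop', hspec]
      simp only [conv1, if_pos hO]
      cases iobesSpec r <;> simp
    · by_cases hB : iobesPfx t = "B"
      · have hstep : stepA full (some acc) ((s : Int), t)
            = some (acc ++ [if nextKeep r then t else PySem.Str.replace t "B-" "S-"]) := by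
          by_cases hk : nextKeep r = true
          · have := hcond.mpr hk
            simp [stepA, hO, hB, this, hk]
          · have hnot : ¬ ((s : Int) + 1 ≠ (full.length : Int) ∧
                iobesPfx (PySem.List.pyGetD full ((s : Int) + 1) "") = "I") := by
              intro h; exact hk (hcond.mp h)
            simp [stepA, hO, hB, hnot, eq_false_of_ne_true hk]
        rw [hstep, hcast,
          ih full (s + 1) (acc ++ [if nextKeep r then t else PySem.Str.replace t "B-" "S-"]) hdrop',
          hspec]
        simp only [conv1, if_neg hO, if_pos hB]
        cases iobesSpec r <;> simp
      · by_cases hI : iobesPfx t = "I"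
        · have hstep : stepA full (some acc) ((s : Int), t)
              = some (acc ++ [if nextKeep r then t else PySem.Str.replace t "I-" "E-"]) := by
            by_cases hk : nextKeep r = true
            · have h2 := hcond.mpr hk
              have h3 : ((s : Int) + 1 < (full.length : Int) ∧
                  iobesPfx (PySem.List.pyGetD full ((s : Int) + 1) "") = "I") :=
                ⟨hlt_iff.mpr h2.1, h2.2⟩
              simp [stepA, hO, hI, h3, hk]
            · have hnot : ¬ ((s : Int) + 1 < (full.length : Int) ∧
                  iobesPfx (PySem.List.pyGetD full ((s : Int) + 1) "") = "I") := by
                intro h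
                exact hk (hcond.mp ⟨hlt_iff.mp h.1, h.2⟩)
              simp [stepA, hO, hI, hnot, eq_false_of_ne_true hk]
          rw [hstep, hcast,
            ih full (s + 1) (acc ++ [if nextKeep r then t else PySem.Str.replace t "I-" "E-"]) hdrop',
            hspec]
          simp only [conv1, if_neg hO, if_neg hB, if_pos hI]
          cases iobesSpec r <;> simp
        · have hstep : stepA full (some acc) ((s : Int), t) = none := by
            simp [stepA, hO, hB, hI]
          rw [hstep, foldlA_none, hspec]
          simp [conv1, hO, hB, hI]

theorem foldlB_none (l : List String) : l.foldl stepB none = none := by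
  induction l with
  | nil => rfl
  | cons a b ihb => simpa [stepB] using ihb

-- the element a pending B-/I- tag is finalized to, given the keep flag
def finVal (pv : String) (k : Bool) : String :=
  if k then pv
  else if iobesPfx pv = "B" then PySem.Str.replace pv "B-" "S-"
  else PySem.Str.replace pv "I-" "E-"

theorem valid_ne_O (pv : String) (hpv : iobesPfx pv = "B" ∨ iobesPfx pv = "I") : pv ≠ "O" := by
  intro h; subst h; revert hpv; decide

theorem conv1_valid (pv : String) (k : Bool)
    (hpv : iobesPfx pv = "B" ∨ iobesPfx pv = "I") : conv1 pv k = some (finVal pv k) := by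
  have hO := valid_ne_O pv hpv
  rcases hpv with h | h
  · cases k <;> simp [conv1, finVal, hO, h]
  · cases k <;> simp [conv1, finVal, hO, h]

theorem finB_valid (out : List String) (pv : String) (k : Bool)
    (hpv : iobesPfx pv = "B" ∨ iobesPfx pv = "I") :
    finB out (some pv) k = out ++ [finVal pv k] := by
  rcases hpv with h | h
  · cases k <;> simp [finB, finVal, h]
  · cases k <;> simp [finB, finVal, h]

theorem nextKeep_cons (t : String) (r : List String) :
    nextKeep (t :: r) = decide (iobesPfx t = "I") := rfl

theorem stepB_O (acc : List String) (prev : Option String) (t : String) (hO : t = "O") :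
    stepB (some (acc, prev)) t = some (finB acc prev false ++ [t], none) := by
  simp [stepB, hO]

theorem stepB_BI (acc : List String) (prev : Option String) (t : String) (hO : t ≠ "O")
    (hBI : iobesPfx t = "B" ∨ iobesPfx t = "I") :
    stepB (some (acc, prev)) t
      = some (finB acc prev (decide (iobesPfx t = "I")), some t) := by
  rcases hBI with h | h <;> simp [stepB, hO, h]

theorem stepB_bad (acc : List String) (prev : Option String) (t : String) (hO : t ≠ "O")
    (hB : iobesPfx t ≠ "B") (hI : iobesPfx t ≠ "I") :
    stepB (some (acc, prev)) t = none := by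
  simp [stepB, hO, hB, hI]

-- B's fold against the same specification recursion, with an optional pending tag
theorem foldlB_both (xs : List String) :
    (∀ acc, (xs.foldl stepB (some (acc, none))).map (fun op => finB op.1 op.2 false)
        = (iobesSpec xs).map (acc ++ ·))
    ∧ (∀ acc pv, (iobesPfx pv = "B" ∨ iobesPfx pv = "I") →
        (xs.foldl stepB (some (acc, some pv))).map (fun op => finB op.1 op.2 false)
          = (iobesSpec (pv :: xs)).map (acc ++ ·)) := by
  induction xs with
  | nil =>
    constructor
    · intro acc; simp [iobesSpec, finB]
    · intro acc pv hpv
      simp only [List.foldl_nil, Option.map_some]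
      rw [finB_valid acc pv false hpv]
      show some (acc ++ [finVal pv false]) = (iobesSpec [pv]).map (acc ++ ·)
      rw [iobesSpec, conv1_valid pv (nextKeep []) hpv]
      simp [iobesSpec, nextKeep]
  | cons t r ih =>
    have hOkeep : ∀ h : t = "O", nextKeep (t :: r) = false := by
      intro h; subst h; simp [nextKeep_cons]; decide
    constructor
    · intro acc
      by_cases hO : t = "O"
      · rw [List.foldl_cons, stepB_O acc none t hO]
        have hIH := ih.1 (finB acc none false ++ [t])
        simp only [finB] at hIH ⊢
        rw [hIH]
        have hspec : iobesSpec (t :: r) = (iobesSpec r).map (t :: ·) := by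
          simp [iobesSpec, conv1, hO]
        rw [hspec]
        cases iobesSpec r <;> simp
      · by_cases hBI : iobesPfx t = "B" ∨ iobesPfx t = "I"
        · rw [List.foldl_cons, stepB_BI acc none t hO hBI]
          simp only [finB]
          exact ih.2 acc t hBI
        · rw [not_or] at hBI
          rw [List.foldl_cons, stepB_bad acc none t hO hBI.1 hBI.2, foldlB_none]
          simp [iobesSpec, conv1, hO, hBI.1, hBI.2]
    · intro acc pv hpv
      have hspec_pv : iobesSpec (pv :: t :: r)
          = (iobesSpec (t :: r)).map (finVal pv (nextKeep (t :: r)) :: ·) := by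
        rw [iobesSpec, conv1_valid pv (nextKeep (t :: r)) hpv]
        rfl
      by_cases hO : t = "O"
      · rw [List.foldl_cons, stepB_O acc (some pv) t hO,
          finB_valid acc pv false hpv]
        have hIH := ih.1 (acc ++ [finVal pv false] ++ [t])
        simp only [finB] at hIH ⊢
        rw [hIH]
        have hspec : iobesSpec (t :: r) = (iobesSpec r).map (t :: ·) := by
          simp [iobesSpec, conv1, hO]
        rw [hspec_pv, hspec, hOkeep hO]
        cases iobesSpec r <;> simp
      · by_cases hBI : iobesPfx t = "B" ∨ iobesPfx t = "I"
        · rw [List.foldl_cons, stepB_BI acc (some pv) t hO hBI,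
            finB_valid acc pv (decide (iobesPfx t = "I")) hpv]
          rw [ih.2 (acc ++ [finVal pv (decide (iobesPfx t = "I"))]) t hBI]
          rw [hspec_pv, nextKeep_cons]
          cases iobesSpec (t :: r) <;> simp
        · rw [not_or] at hBI
          rw [List.foldl_cons, stepB_bad acc (some pv) t hO hBI.1 hBI.2, foldlB_none]
          have hspec : iobesSpec (t :: r) = none := by
            simp [iobesSpec, conv1, hO, hBI.1, hBI.2]
          rw [hspec_pv, hspec]
          rfl

theorem convert_iobes_eq_spec (tags : List String) :
    convert_iobes tags = match iobesSpec tags with | none => [] | some l => l := by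
  unfold convert_iobes
  have := foldlA_spec tags tags 0 [] (by simp)
  rw [show ((0 : Nat) : Int) = (0 : Int) from rfl] at this
  rw [this]
  cases iobesSpec tags <;> simp

theorem convert_iobes_alt_eq_spec (tags : List String) :
    convert_iobes_alt tags = match iobesSpec tags with | none => [] | some l => l := by
  unfold convert_iobes_alt
  have := (foldlB_both tags).1 []
  cases hf : tags.foldl stepB (some ([], none)) with
  | none => rw [hf] at this; cases h : iobesSpec tags <;> simp_all
  | some op =>
    rw [hf] at this
    cases h : iobesSpec tags with
    | none => simp_all
    | some l => simp_all

-- ===== VERDICT (by name: the statement is the Claim_ definition above) =====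
theorem convert_iobes_spec : Claim_equal_convert_iobes := by
  intro tags _ _
  unfold Spec_convert_iobes
  rw [convert_iobes_eq_spec, convert_iobes_alt_eq_spec]
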